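-- pv_equiv track=rewrite | github.com/neutrino2211/owl-bundle | FQL.py | FAssign2
-- ===== SOURCE A (Python) =====
-- def FAssign2(iterable):
--     m = ""
--     for i in iterable:
--         if i == "aa":
--             m+="e"
--         elif i == "ab":
--             m+="f"
--         elif i == "ac":
--             m+="g"
--         elif i == "ad":
--             m+="h"
--         elif i == "ba":
--             m+="i"
--         elif i == "bb":
--             m+="j"
--         elif i == "bc":
--             m+="k"
--         elif i == "bd":
--             m+="l"
--         elif i == "ca":
--             m+="m"
--         elif i == "cb":
--             m+="n"
--         elif i == "cc":
--             m+="o"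
--         elif i == "cd":
--             m+="p"
--         elif i == "da":
--             m+="q"
--         elif i == "db":
--             m+="r"
--         elif i == "dc":
--             m+="s"
--         elif i == "dd":
--             m+="t"
--     return m
-- ===== SOURCE B (Python) =====
-- def FAssign2(iterable):
--     def decode(i):
--         if isinstance(i, str) and len(i) == 2 and i[0] in "abcd" and i[1] in "abcd":
--             return chr(ord('e') + 4 * (ord(i[0]) - ord('a')) + (ord(i[1]) - ord('a')))
--         return ""
--     return "".join(decode(i) for i in iterable)
-- ===== Notes on version B (the rewrite author's own statement) =====
-- stated objective: simpler
-- what changed: Replaces the 16-way if/elif chain by an arithmetic closed form chr(ord('e') + 4*(ord(i[0])-ord('a')) + (ord(i[1])-ord('a'))) guarded by a membership check, joining the per-element results.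
import Mathlib
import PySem

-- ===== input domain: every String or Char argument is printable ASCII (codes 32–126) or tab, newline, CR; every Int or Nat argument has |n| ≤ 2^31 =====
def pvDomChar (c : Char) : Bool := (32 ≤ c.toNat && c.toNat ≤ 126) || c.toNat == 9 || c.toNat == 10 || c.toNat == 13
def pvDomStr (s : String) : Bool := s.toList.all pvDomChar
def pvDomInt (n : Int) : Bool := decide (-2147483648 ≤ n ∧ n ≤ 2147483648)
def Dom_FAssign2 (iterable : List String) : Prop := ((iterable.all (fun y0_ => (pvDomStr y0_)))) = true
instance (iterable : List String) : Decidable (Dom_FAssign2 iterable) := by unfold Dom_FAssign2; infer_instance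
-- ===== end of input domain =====

-- B replaces A's 16-way if/elif chain by an arithmetic closed form per element (simpler, same cost).


-- ===== PORT A =====
-- loop body of A: the 16-way if/elif chain, appending to the accumulator (chars of m)
def pvStepA (m : List Char) (cs : List Char) : List Char :=
  if cs = ['a','a'] then m ++ ['e']
  else if cs = ['a','b'] then m ++ ['f']
  else if cs = ['a','c'] then m ++ ['g']
  else if cs = ['a','d'] then m ++ ['h']
  else if cs = ['b','a'] then m ++ ['i']
  else if cs = ['b','b'] then m ++ ['j']
  else if cs = ['b','c'] then m ++ ['k']
  else if cs = ['b','d'] then m ++ ['l']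
  else if cs = ['c','a'] then m ++ ['m']
  else if cs = ['c','b'] then m ++ ['n']
  else if cs = ['c','c'] then m ++ ['o']
  else if cs = ['c','d'] then m ++ ['p']
  else if cs = ['d','a'] then m ++ ['q']
  else if cs = ['d','b'] then m ++ ['r']
  else if cs = ['d','c'] then m ++ ['s']
  else if cs = ['d','d'] then m ++ ['t']
  else m

def FAssign2 (iterable : List String) : String :=
  String.ofList (iterable.foldl (fun m i => pvStepA m i.toList) [])

-- ===== PORT B =====
-- B's decode helper: closed-form mapping of one element (empty when it does not match)
def pvDecodeB (cs : List Char) : List Char :=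
  match cs with
  | [c1, c2] =>
    if c1 ∈ ['a','b','c','d'] ∧ c2 ∈ ['a','b','c','d'] then
      [Char.ofNat ('e'.toNat + 4 * (c1.toNat - 'a'.toNat) + (c2.toNat - 'a'.toNat))]
    else []
  | _ => []

def FAssign2_alt (iterable : List String) : String :=
  String.ofList (iterable.flatMap (fun i => pvDecodeB i.toList))

-- ===== PRECONDITION & SPEC =====
def Spec_FAssign2 (iterable : List String) (out : String) : Prop := out = FAssign2_alt iterable
instance (iterable : List String) (out : String) : Decidable (Spec_FAssign2 iterable out) := by unfold Spec_FAssign2; infer_instance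

-- ===== CLAIM (what is proved, stated in full; the proofs are below) =====
def Claim_equal_FAssign2 : Prop := ∀ (iterable : List String), Dom_FAssign2 iterable → Spec_FAssign2 iterable (FAssign2 iterable)

-- ===== LEMMAS AND PROOFS =====

-- one element: A's if/elif chain appends exactly B's closed-form decoding
theorem pvStepA_eq_append_decode (m cs : List Char) : pvStepA m cs = m ++ pvDecodeB cs := by
  match cs with
  | [] => simp [pvStepA, pvDecodeB]
  | [_] => simp [pvStepA, pvDecodeB]
  | _ :: _ :: _ :: _ => simp [pvStepA, pvDecodeB]
  | [c1, c2] =>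
    by_cases h : c1 ∈ ['a','b','c','d'] ∧ c2 ∈ ['a','b','c','d']
    · obtain ⟨h1, h2⟩ := h
      simp only [List.mem_cons, List.not_mem_nil, or_false] at h1 h2
      rcases h1 with rfl | rfl | rfl | rfl <;> rcases h2 with rfl | rfl | rfl | rfl <;> rfl
    · have hne : ∀ d1 d2 : Char, d1 ∈ (['a','b','c','d'] : List Char) →
          d2 ∈ (['a','b','c','d'] : List Char) → ¬([c1, c2] = [d1, d2]) := by
        intro d1 d2 hd1 hd2 heq
        rcases heq with ⟨⟩
        exact h ⟨hd1, hd2⟩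
      simp only [pvStepA, pvDecodeB, if_neg h, List.append_nil]
      rw [if_neg (hne _ _ (by decide) (by decide)), if_neg (hne _ _ (by decide) (by decide)),
          if_neg (hne _ _ (by decide) (by decide)), if_neg (hne _ _ (by decide) (by decide)),
          if_neg (hne _ _ (by decide) (by decide)), if_neg (hne _ _ (by decide) (by decide)),
          if_neg (hne _ _ (by decide) (by decide)), if_neg (hne _ _ (by decide) (by decide)),
          if_neg (hne _ _ (by decide) (by decide)), if_neg (hne _ _ (by decide) (by decide)),
          if_neg (hne _ _ (by decide) (by decide)), if_neg (hne _ _ (by decide) (by decide)),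
          if_neg (hne _ _ (by decide) (by decide)), if_neg (hne _ _ (by decide) (by decide)),
          if_neg (hne _ _ (by decide) (by decide)), if_neg (hne _ _ (by decide) (by decide))]

-- the whole loop: A's foldl equals B's flatMap, for any accumulator
theorem pvFold_eq_flatMap (xs : List String) (m : List Char) :
    xs.foldl (fun m i => pvStepA m i.toList) m = m ++ xs.flatMap (fun i => pvDecodeB i.toList) := by
  induction xs generalizing m with
  | nil => simp
  | cons x xs ih =>
    rw [List.foldl_cons, pvStepA_eq_append_decode, ih, List.flatMap_cons, List.append_assoc]

-- ===== VERDICT (by name: the statement is the Claim_ definition above) =====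
theorem FAssign2_spec : Claim_equal_FAssign2 := by
  intro iterable _
  unfold Spec_FAssign2 FAssign2 FAssign2_alt
  rw [pvFold_eq_flatMap, List.nil_append]
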